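-- pv_equiv track=rewrite | github.com/andyboulle/cbb-tracker | main.py | determine_daily_record
-- ===== SOURCE A (Python) =====
-- def determine_daily_record(results):
--     wins = 0
--     losses = 0
--
--     for result in results:
--         if result['result'] == 'W':
--             wins += 1
--         else:
--             losses += 1
--
--     return f'{wins}-{losses}'
-- ===== SOURCE B (Python) =====
-- def determine_daily_record(results):
--     rs = list(results)
--
--     def wins(lo, hi):
--         # divide and conquer: number of 'W' results in rs[lo:hi]
--         if lo == hi:
--             return 0
--         if hi - lo == 1:
--             return 1 if rs[lo]['result'] == 'W' else 0
--         mid = (lo + hi) // 2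
--         return wins(lo, mid) + wins(mid, hi)
--
--     w = wins(0, len(rs))
--     return f'{w}-{len(rs) - w}'
-- ===== Notes on version B (the rewrite author's own statement) =====
-- stated objective: alternative
-- what changed: Replaces the linear two-counter loop by a divide-and-conquer recursion that counts wins over binary halves of the list and derives losses arithmetically as len(results) - wins.
import Mathlib
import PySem

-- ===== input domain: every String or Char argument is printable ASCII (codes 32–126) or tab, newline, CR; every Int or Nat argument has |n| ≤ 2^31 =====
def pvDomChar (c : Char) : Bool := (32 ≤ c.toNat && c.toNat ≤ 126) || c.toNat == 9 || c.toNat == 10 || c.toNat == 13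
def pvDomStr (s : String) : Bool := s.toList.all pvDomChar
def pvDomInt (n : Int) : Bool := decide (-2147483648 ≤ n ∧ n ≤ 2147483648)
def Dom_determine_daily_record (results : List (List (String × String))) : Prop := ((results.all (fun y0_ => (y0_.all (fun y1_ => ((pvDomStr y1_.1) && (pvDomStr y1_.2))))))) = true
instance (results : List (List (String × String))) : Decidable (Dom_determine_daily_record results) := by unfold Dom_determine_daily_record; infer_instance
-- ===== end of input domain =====

-- B replaces A's linear two-counter loop by a divide-and-conquer count of wins over
-- binary halves, with losses derived as len - wins; objective: alternative.

-- dict lookup result['result'] (first match in the association list); the default "" is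
-- never reached under Pre_ (which guarantees the key is present)
def pvResultOf (result : List (String × String)) : String :=
  ((result.find? (fun p => p.1 == "result")).map (·.2)).getD ""

-- ===== PORT A =====
-- A: two counters maintained in one loop over results
def determine_daily_record (results : List (List (String × String))) : String :=
  let st := results.foldl
    (fun (wl : Int × Int) result =>
      if pvResultOf result == "W" then (wl.1 + 1, wl.2) else (wl.1, wl.2 + 1))
    (0, 0)
  PySem.Int.toStr st.1 ++ "-" ++ PySem.Int.toStr st.2

-- ===== PORT B =====
-- B's helper wins(lo, hi) counts 'W' in rs[lo:hi] by splitting at the midpoint;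
-- here the sublist rs[lo:hi] is the argument, and the midpoint split (hi-lo)//2
-- (= (lo+hi)//2 - lo) becomes take/drop at length/2.
def pvWins : List (List (String × String)) → Int
  | [] => 0
  | [r] => if pvResultOf r == "W" then 1 else 0
  | r1 :: r2 :: rest =>
      pvWins ((r1 :: r2 :: rest).take ((r1 :: r2 :: rest).length / 2))
      + pvWins ((r1 :: r2 :: rest).drop ((r1 :: r2 :: rest).length / 2))
termination_by rs => rs.length
decreasing_by
  · simp [List.length_take]; omega
  · simp [List.length_drop]; omega

def determine_daily_record_alt (results : List (List (String × String))) : String :=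
  let w := pvWins results
  PySem.Int.toStr w ++ "-" ++ PySem.Int.toStr ((results.length : Int) - w)

-- ===== PRECONDITION & SPEC =====
-- Pre_ excludes elements without a "result" key, on which Python A raises KeyError.
def Pre_determine_daily_record (results : List (List (String × String))) : Prop :=
  ∀ r ∈ results, (r.find? (fun p => p.1 == "result")).isSome = true
instance (results : List (List (String × String))) : Decidable (Pre_determine_daily_record results) := by unfold Pre_determine_daily_record; infer_instance
def pvWitness_determine_daily_record : (List (List (String × String))) :=
  [[("result", "W")], [("result", "L")]]
def Spec_determine_daily_record (results : List (List (String × String))) (out : String) : Prop := out = determine_daily_record_alt results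
instance (results : List (List (String × String))) (out : String) : Decidable (Spec_determine_daily_record results out) := by unfold Spec_determine_daily_record; infer_instance

-- ===== CLAIM (what is proved, stated in full; the proofs are below) =====
def Claim_equal_determine_daily_record : Prop := ∀ (results : List (List (String × String))), Dom_determine_daily_record results → Pre_determine_daily_record results → Spec_determine_daily_record results (determine_daily_record results)

-- ===== LEMMAS AND PROOFS =====

-- characterisation of B's divide-and-conquer count: it is the number of 'W' results
theorem pvWins_eq (rs : List (List (String × String))) :
    pvWins rs = ((rs.filter (fun r => pvResultOf r == "W")).length : Int) := by
  induction rs using pvWins.induct with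
  | case1 => simp [pvWins]
  | case2 r h => simp [pvWins, h]
  | case3 r h => simp [pvWins, h]
  | case4 r1 r2 rest ih1 ih2 =>
    rw [pvWins, ih1, ih2]
    rw [show ((( (r1 :: r2 :: rest).take ((r1 :: r2 :: rest).length / 2)).filter (fun r => pvResultOf r == "W")).length : Int)
            + ((((r1 :: r2 :: rest).drop ((r1 :: r2 :: rest).length / 2)).filter (fun r => pvResultOf r == "W")).length : Int)
          = (((((r1 :: r2 :: rest).take ((r1 :: r2 :: rest).length / 2)).filter (fun r => pvResultOf r == "W"))
              ++ (((r1 :: r2 :: rest).drop ((r1 :: r2 :: rest).length / 2)).filter (fun r => pvResultOf r == "W"))).length : Int) from by simp]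
    rw [← List.filter_append, List.take_append_drop]

-- loop invariant for A's fold: the counters are the start values plus the win count
-- and the complementary count
theorem pv_fold_counts (results : List (List (String × String))) (w l : Int) :
    results.foldl
      (fun (wl : Int × Int) result =>
        if pvResultOf result == "W" then (wl.1 + 1, wl.2) else (wl.1, wl.2 + 1))
      (w, l)
    = (w + ((results.filter (fun result => pvResultOf result == "W")).length : Int),
       l + ((results.length : Int)
            - ((results.filter (fun result => pvResultOf result == "W")).length : Int))) := by
  induction results generalizing w l with
  | nil => simp
  | cons r rs ih =>
    by_cases h : (pvResultOf r == "W") = true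
    · simp only [List.foldl_cons, ih, List.filter_cons, h, if_true,
        List.length_cons, Prod.mk.injEq]
      constructor <;> push_cast <;> ring
    · simp only [List.foldl_cons, ih, List.filter_cons, h, List.length_cons, Prod.mk.injEq]
      constructor <;> push_cast <;> ring

-- ===== VERDICT (by name: the statement is the Claim_ definition above) =====
theorem determine_daily_record_spec : Claim_equal_determine_daily_record := by
  intro results _ _
  unfold Spec_determine_daily_record determine_daily_record determine_daily_record_alt
  rw [pv_fold_counts, pvWins_eq]
  simp
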